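-- pv_equiv track=rewrite | github.com/LarsGab/tiberius_orf_finder | src/tiberius_orf/data/label_transcripts.py | _parse_attr
-- ===== SOURCE A (Python) =====
-- def _parse_attr(attr_col: str, key: str) -> str | None:
--     # Supports both GTF (key "value";) and GFF3 (key=value;).
--     for chunk in attr_col.strip().strip(";").split(";"):
--         chunk = chunk.strip()
--         if not chunk:
--             continue
--         if "=" in chunk and " " not in chunk.split("=", 1)[0]:
--             k, v = chunk.split("=", 1)
--             if k.strip() == key:
--                 return v.strip().strip('"')
--         else:
--             parts = chunk.split(None, 1)
--             if len(parts) == 2 and parts[0] == key: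
--                 return parts[1].strip().strip('"')
--     return None
-- ===== SOURCE B (Python) =====
-- def _parse_chunk(chunk):
--     chunk = chunk.strip()
--     if not chunk:
--         return None
--     if "=" in chunk:
--         k, v = chunk.split("=", 1)
--         if " " not in k:
--             return (k.strip(), v.strip().strip('"'))
--     parts = chunk.split(None, 1)
--     if len(parts) == 2:
--         return (parts[0], parts[1].strip().strip('"'))
--     return None
--
--
-- def _parse_attr(attr_col: str, key: str) -> str | None:
--     pairs = [p for p in map(_parse_chunk, attr_col.strip().strip(";").split(";")) if p is not None]
--     # dict(reversed(pairs)) keeps the FIRST occurrence of every key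
--     return dict(reversed(pairs)).get(key)
-- ===== Notes on version B (the rewrite author's own statement) =====
-- stated objective: alternative
-- what changed: A scans chunks and early-returns at the first key match; B parses every chunk once into (key,value) pairs and answers with a single lookup in dict(reversed(pairs)), which keeps the first occurrence of each key.
import Mathlib
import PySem

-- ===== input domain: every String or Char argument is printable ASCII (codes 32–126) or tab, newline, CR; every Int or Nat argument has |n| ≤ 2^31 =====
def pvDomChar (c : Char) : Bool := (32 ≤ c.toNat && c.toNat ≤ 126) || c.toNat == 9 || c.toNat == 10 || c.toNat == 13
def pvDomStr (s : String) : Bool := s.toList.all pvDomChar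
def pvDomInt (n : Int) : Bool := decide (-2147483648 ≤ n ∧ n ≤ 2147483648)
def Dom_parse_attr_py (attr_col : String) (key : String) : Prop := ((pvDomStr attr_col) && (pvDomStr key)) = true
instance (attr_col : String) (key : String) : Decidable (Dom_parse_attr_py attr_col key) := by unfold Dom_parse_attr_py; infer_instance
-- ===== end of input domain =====

-- B parses every chunk into (key, value) pairs once and answers by a single dict lookup
-- (dict(reversed(pairs)) keeps the first occurrence); objective: alternative decomposition, same cost.

-- ===== PORT A =====
-- literal transliteration of A's scan-until-match loop (early return) over the chunks
def pvParseA_go (key : String) : List String → Option String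
  | [] => none
  | c :: rest =>
    let chunk := PySem.Str.strip c
    if chunk = "" then pvParseA_go key rest
    else
      -- chunk.split("=", 1): sep ≠ "" so splitMax? is always some; getD [] never fires
      let ps := (PySem.Str.splitMax? chunk "=" 1).getD []
      if PySem.Str.isIn "=" chunk && !(PySem.Str.isIn " " (ps.headD "")) then
        -- k, v = chunk.split("=", 1): "=" in chunk guarantees two parts
        let k := ps.headD ""
        let v := ps.getD 1 ""
        if PySem.Str.strip k = key then
          some (PySem.Str.stripChars (PySem.Str.strip v) "\"")
        else pvParseA_go key rest
      else
        let parts := PySem.Str.split₀Max chunk 1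
        if parts.length = 2 && parts.headD "" = key then
          some (PySem.Str.stripChars (PySem.Str.strip (parts.getD 1 "")) "\"")
        else pvParseA_go key rest

def parse_attr_py (attr_col : String) (key : String) : Option String :=
  pvParseA_go key ((PySem.Str.split? (PySem.Str.stripChars (PySem.Str.strip attr_col) ";") ";").getD [])

-- ===== PORT B =====
-- Source B's _parse_chunk: parse one chunk into an optional (key, value) pair
def pvParseChunk (c : String) : Option (String × String) :=
  let chunk := PySem.Str.strip c
  if chunk = "" then none
  else
    let gff :=
      if PySem.Str.isIn "=" chunk then
        let ps := (PySem.Str.splitMax? chunk "=" 1).getD []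
        let k := ps.headD ""
        if !(PySem.Str.isIn " " k) then
          some (PySem.Str.strip k, PySem.Str.stripChars (PySem.Str.strip (ps.getD 1 "")) "\"")
        else none
      else none
    match gff with
    | some p => some p
    | none =>
      let parts := PySem.Str.split₀Max chunk 1
      if parts.length = 2 then
        some (parts.headD "", PySem.Str.stripChars (PySem.Str.strip (parts.getD 1 "")) "\"")
      else none

def parse_attr_py_alt (attr_col : String) (key : String) : Option String :=
  let pairs := (((PySem.Str.split? (PySem.Str.stripChars (PySem.Str.strip attr_col) ";") ";").getD []).map pvParseChunk).filterMap id
  -- dict(reversed(pairs)).get(key)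
  (pairs.reverse.foldl (fun d p => d.insert p.1 p.2) (PySem.Dict.empty : PySem.Dict String String)).get? key

-- ===== PRECONDITION & SPEC =====
def Spec_parse_attr_py (attr_col : String) (key : String) (out : Option String) : Prop := out = parse_attr_py_alt attr_col key
instance (attr_col : String) (key : String) (out : Option String) : Decidable (Spec_parse_attr_py attr_col key out) := by unfold Spec_parse_attr_py; infer_instance

-- ===== CLAIM (what is proved, stated in full; the proofs are below) =====
def Claim_equal_parse_attr_py : Prop := ∀ (attr_col : String) (key : String), Dom_parse_attr_py attr_col key → Spec_parse_attr_py attr_col key (parse_attr_py attr_col key)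

-- ===== LEMMAS AND PROOFS =====

-- the reversed-insert dict answers get? with the FIRST pair whose key matches
theorem pv_dict_rev_get (l : List (String × String)) (key : String) :
    ((l.reverse.foldl (fun d p => d.insert p.1 p.2) (PySem.Dict.empty : PySem.Dict String String)).get? key)
      = (l.find? (fun p => p.1 == key)).map (·.2) := by
  induction l with
  | nil => rfl
  | cons a t ih =>
    rw [List.reverse_cons, List.foldl_append]
    simp only [List.foldl_cons, List.foldl_nil]
    rw [PySem.Dict.get?_insert, List.find?_cons]
    by_cases h : a.1 = key
    · have hb : (a.1 == key) = true := by simp [h]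
      simp only [hb, if_pos h.symm, Option.map_some]
    · have hb : (a.1 == key) = false := by simp [h]
      rw [if_neg (fun hk => h hk.symm)]
      simp only [hb]
      exact ih

-- A's step on one chunk agrees with B's chunk parse
theorem pv_step (key : String) (rest : List String) (c : String) :
    pvParseA_go key (c :: rest)
      = match pvParseChunk c with
        | some (k, v) => if k == key then some v else pvParseA_go key rest
        | none => pvParseA_go key rest := by
  rw [pvParseA_go, pvParseChunk]
  by_cases h0 : PySem.Str.strip c = ""
  · simp [h0]
  · simp only [if_neg h0]
    split_ifs <;> simp_all

-- A's scan is the first match among the parsed pairs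
theorem pv_scan (key : String) (chunks : List String) :
    pvParseA_go key chunks
      = ((chunks.filterMap pvParseChunk).find? (fun p => p.1 == key)).map (·.2) := by
  induction chunks with
  | nil => rfl
  | cons c rest ih =>
    rw [pv_step]
    cases hc : pvParseChunk c with
    | none => simp [hc, ih]
    | some p =>
      obtain ⟨k, v⟩ := p
      simp only [List.filterMap_cons, hc, List.find?_cons]
      by_cases hk : (k == key) = true
      · simp [hk]
      · simp only [Bool.not_eq_true] at hk
        simp [hk, ih]

-- ===== VERDICT (by name: the statement is the Claim_ definition above) =====
theorem parse_attr_py_spec : Claim_equal_parse_attr_py := by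
  intro attr_col key _
  unfold Spec_parse_attr_py
  simp only [parse_attr_py, parse_attr_py_alt]
  rw [pv_scan, pv_dict_rev_get, List.filterMap_map]
  rfl
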